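-- pv_equiv track=rewrite | github.com/synapsebiopharma-cyber/Vedolizumab_tracker | pipeline_scrapers/samsung_bioepis_pipeline.py | infer_current_phase
-- ===== SOURCE A (Python) =====
-- def infer_current_phase(trial_links):
--     """
--     Infer the highest active phase from trial link labels.
--     e.g. 'Learn more about the clinical trial (phase III)' → 'Phase III'
--     """
--     phase_order = ["phase i", "phase ii", "phase iii", "phase iv"]
--     highest = None
--     for link in trial_links:
--         text_lower = link["text"].lower()
--         for phase in reversed(phase_order):
--             if phase in text_lower:
--                 if highest is None or phase_order.index(phase) > phase_order.index(highest):
--                     highest = phase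
--                 break
--     phase_labels = {
--         "phase i": "Phase I",
--         "phase ii": "Phase II",
--         "phase iii": "Phase III",
--         "phase iv": "Phase IV",
--     }
--     return phase_labels.get(highest) if highest else None
-- ===== SOURCE B (Python) =====
-- def infer_current_phase(trial_links):
--     """
--     Infer the highest active phase from trial link labels.
--     Flatten all matching phase ranks into one list, then take the max.
--     """
--     phase_order = ["phase i", "phase ii", "phase iii", "phase iv"]
--     phase_labels = ["Phase I", "Phase II", "Phase III", "Phase IV"]
--     ranks = [i for link in trial_links
--                for i, p in enumerate(phase_order) if p in link["text"].lower()]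
--     return phase_labels[max(ranks)] if ranks else None
-- ===== Notes on version B (the rewrite author's own statement) =====
-- stated objective: simpler
-- what changed: Replaces the per-link reversed inner loop with break and the running-highest string accumulator by one flat comprehension of all matching phase ranks followed by a single max and a direct label-list index.
import Mathlib
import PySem

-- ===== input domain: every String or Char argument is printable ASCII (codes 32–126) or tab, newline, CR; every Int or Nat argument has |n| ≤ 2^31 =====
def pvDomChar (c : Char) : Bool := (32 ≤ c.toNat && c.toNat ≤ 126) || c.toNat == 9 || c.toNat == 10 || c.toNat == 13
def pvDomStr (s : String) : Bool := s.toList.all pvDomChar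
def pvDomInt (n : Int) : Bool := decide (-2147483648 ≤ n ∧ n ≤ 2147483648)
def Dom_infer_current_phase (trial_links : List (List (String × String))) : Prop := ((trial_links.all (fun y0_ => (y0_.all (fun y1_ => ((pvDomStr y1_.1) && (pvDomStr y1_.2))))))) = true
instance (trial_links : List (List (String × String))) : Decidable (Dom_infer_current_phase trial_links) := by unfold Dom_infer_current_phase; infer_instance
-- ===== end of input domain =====

-- B drops A's reversed inner loop / running-highest accumulator for one flat list of matching
-- phase ranks reduced by max (objective: simpler).

-- ===== PORT A =====
def pvPhaseOrder : List String := ["phase i", "phase ii", "phase iii", "phase iv"]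

def pvPhaseLabelsDict : PySem.Dict String String :=
  PySem.Dict.mk [("phase i", "Phase I"), ("phase ii", "Phase II"),
                 ("phase iii", "Phase III"), ("phase iv", "Phase IV")]

-- 'for phase in reversed(phase_order): if phase in text_lower: (maybe update highest); break'
-- phase_order.index never raises here since both arguments come from pvPhaseOrder, so .getD 0 is exact.
def pvInnerA (t : String) : List String → Option String → Option String
  | [], h => h
  | p :: rest, h =>
    if PySem.Str.isIn p t then
      match h with
      | none => some p
      | some hv =>
        if ((PySem.List.index? pvPhaseOrder hv).getD 0 : Nat) < (PySem.List.index? pvPhaseOrder p).getD 0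
        then some p else some hv
    else pvInnerA t rest h

def infer_current_phase (trial_links : List (List (String × String))) : Option String :=
  -- 'highest' inlined into the final match
  match trial_links.foldl (fun h link =>
    match (PySem.Dict.mk link).get? "text" with
    | none => h  -- Python raises KeyError here; such inputs are excluded by Pre_
    | some txt => pvInnerA (PySem.Str.lower txt) pvPhaseOrder.reverse h) none with
  | none => none
  | some hv => if hv == "" then none else PySem.Dict.get? pvPhaseLabelsDict hv

-- ===== PORT B =====
def pvLabelsList : List String := ["Phase I", "Phase II", "Phase III", "Phase IV"]

def infer_current_phase_alt (trial_links : List (List (String × String))) : Option String :=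
  -- 'ranks' inlined into the final match
  match PySem.List.max? (trial_links.flatMap (fun link =>
    match (PySem.Dict.mk link).get? "text" with
    | none => ([] : List Int)  -- Python raises KeyError here; such inputs are excluded by Pre_
    | some txt =>
      (PySem.List.enumerate pvPhaseOrder).filterMap (fun ip =>
        if PySem.Str.isIn ip.2 (PySem.Str.lower txt) then some ip.1 else none))) (fun x => x) with
  | none => none
  | some m => PySem.List.pyGet? pvLabelsList m  -- index always in range, so never IndexError

-- ===== PRECONDITION & SPEC =====
-- Pre_ excludes exactly the links without a "text" key, on which both Pythons raise KeyError.
def Pre_infer_current_phase (trial_links : List (List (String × String))) : Prop :=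
  ∀ link ∈ trial_links, ((PySem.Dict.mk link).get? "text").isSome = true
instance (trial_links : List (List (String × String))) : Decidable (Pre_infer_current_phase trial_links) := by
  unfold Pre_infer_current_phase; infer_instance

def pvWitness_infer_current_phase : (List (List (String × String))) :=
  [[("text", "Learn more (Phase III)")], [("text", "phase i trial")]]

def Spec_infer_current_phase (trial_links : List (List (String × String))) (out : Option String) : Prop := out = infer_current_phase_alt trial_links
instance (trial_links : List (List (String × String))) (out : Option String) : Decidable (Spec_infer_current_phase trial_links out) := by unfold Spec_infer_current_phase; infer_instance

-- ===== CLAIM (what is proved, stated in full; the proofs are below) =====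
def Claim_equal_infer_current_phase : Prop := ∀ (trial_links : List (List (String × String))), Dom_infer_current_phase trial_links → Pre_infer_current_phase trial_links → Spec_infer_current_phase trial_links (infer_current_phase trial_links)

-- ===== LEMMAS AND PROOFS =====

-- the running maximum over Option Int
def pvOmax : Option Int → Option Int → Option Int
  | none, b => b
  | some x, none => some x
  | some x, some y => some (max x y)

-- max of a nonempty Int list (the shape PySem.List.max? reduces to under the identity key)
def pvM : List Int → Option Int
  | [] => none
  | x :: t => some (t.foldl max x)

def pvRanksOf (t : String) : List Int :=
  (PySem.List.enumerate pvPhaseOrder).filterMap (fun ip =>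
    if PySem.Str.isIn ip.2 t then some ip.1 else none)

def pvToPhase : Option Int → Option String
  | none => none
  | some 0 => some "phase i"
  | some 1 => some "phase ii"
  | some 2 => some "phase iii"
  | some 3 => some "phase iv"
  | some _ => none

def pvS (m : Option Int) : Prop :=
  m = none ∨ m = some 0 ∨ m = some 1 ∨ m = some 2 ∨ m = some 3

def pvLinkRank (link : List (String × String)) : Option Int :=
  match (PySem.Dict.mk link).get? "text" with
  | none => none
  | some txt => pvM (pvRanksOf (PySem.Str.lower txt))

@[simp] lemma pvOmax_none_left (b : Option Int) : pvOmax none b = b := rfl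

@[simp] lemma pvOmax_none_right (a : Option Int) : pvOmax a none = a := by
  cases a <;> rfl

lemma pvS_ranks (t : String) : pvS (pvM (pvRanksOf t)) := by
  unfold pvS pvRanksOf
  by_cases h0 : PySem.Str.isIn "phase i" t <;>
  by_cases h1 : PySem.Str.isIn "phase ii" t <;>
  by_cases h2 : PySem.Str.isIn "phase iii" t <;>
  by_cases h3 : PySem.Str.isIn "phase iv" t <;>
  simp at h0 h1 h2 h3 <;>
  simp [PySem.List.enumerate, pvPhaseOrder, h0, h1, h2, h3, pvM]

lemma pvS_omax {a b : Option Int} (ha : pvS a) (hb : pvS b) : pvS (pvOmax a b) := by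
  rcases ha with h|h|h|h|h <;> rcases hb with h'|h'|h'|h'|h' <;> subst h <;> subst h' <;> simp [pvS, pvOmax]

lemma pvStepA (t : String) (m : Option Int) (hm : pvS m) :
    pvInnerA t pvPhaseOrder.reverse (pvToPhase m) = pvToPhase (pvOmax m (pvM (pvRanksOf t))) := by
  rcases hm with h|h|h|h|h <;> subst h <;>
  by_cases h0 : PySem.Str.isIn "phase i" t <;>
  by_cases h1 : PySem.Str.isIn "phase ii" t <;>
  by_cases h2 : PySem.Str.isIn "phase iii" t <;>
  by_cases h3 : PySem.Str.isIn "phase iv" t <;>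
  simp at h0 h1 h2 h3 <;>
  simp [pvInnerA, pvPhaseOrder, pvToPhase, pvOmax, pvM, pvRanksOf,
        PySem.List.enumerate, h0, h1, h2, h3] <;>
  decide

lemma pvFoldA (tl : List (List (String × String)))
    (hpre : ∀ link ∈ tl, ((PySem.Dict.mk link).get? "text").isSome = true)
    (m : Option Int) (hm : pvS m) :
    tl.foldl (fun h link =>
        match (PySem.Dict.mk link).get? "text" with
        | none => h
        | some txt => pvInnerA (PySem.Str.lower txt) pvPhaseOrder.reverse h) (pvToPhase m)
      = pvToPhase (tl.foldl (fun acc l => pvOmax acc (pvLinkRank l)) m) := by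
  induction tl generalizing m with
  | nil => rfl
  | cons l tl ih =>
    have hl : ((PySem.Dict.mk l).get? "text").isSome = true := hpre l (by simp)
    obtain ⟨txt, htxt⟩ := Option.isSome_iff_exists.mp hl
    simp only [List.foldl_cons, htxt, pvLinkRank]
    rw [pvStepA _ _ hm]
    exact ih (fun link h => hpre link (by simp [h])) _ (pvS_omax hm (pvS_ranks _))

lemma pvFoldlMax (u : List Int) (a b : Int) : u.foldl max (max a b) = max a (u.foldl max b) := by
  induction u generalizing b with
  | nil => rfl
  | cons y u ih =>
    simp only [List.foldl_cons]
    rw [max_assoc]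
    exact ih _

lemma pvM_append (xs ys : List Int) : pvM (xs ++ ys) = pvOmax (pvM xs) (pvM ys) := by
  cases xs with
  | nil => cases ys <;> simp [pvM, pvOmax]
  | cons x t =>
    cases ys with
    | nil => simp [pvM, pvOmax]
    | cons y u =>
      simp only [pvM, pvOmax, List.cons_append, List.foldl_append, List.foldl_cons,
        Option.some.injEq]
      exact pvFoldlMax u (t.foldl max x) y

lemma pvOmax_assoc (a b c : Option Int) : pvOmax (pvOmax a b) c = pvOmax a (pvOmax b c) := by
  rcases a with _|a <;> rcases b with _|b <;> rcases c with _|c <;> simp [pvOmax, max_assoc]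

lemma pvFoldl_omax (tl : List (List (String × String))) (m : Option Int) :
    tl.foldl (fun acc l => pvOmax acc (pvLinkRank l)) m
      = pvOmax m (pvM (tl.flatMap (fun l => match (PySem.Dict.mk l).get? "text" with
          | none => [] | some txt => pvRanksOf (PySem.Str.lower txt)))) := by
  induction tl generalizing m with
  | nil => simp [pvM]
  | cons l tl ih =>
    simp only [List.foldl_cons, List.flatMap_cons, pvM_append]
    rw [ih]
    simp only [pvLinkRank]
    cases h : (PySem.Dict.mk l).get? "text" with
    | none => simp [pvM]
    | some txt => simp [pvOmax_assoc]

lemma pvS_fold (tl : List (List (String × String))) (m : Option Int) (hm : pvS m) :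
    pvS (tl.foldl (fun acc l => pvOmax acc (pvLinkRank l)) m) := by
  induction tl generalizing m with
  | nil => exact hm
  | cons l tl ih =>
    refine ih _ (pvS_omax hm ?_)
    unfold pvLinkRank
    cases (PySem.Dict.mk l).get? "text" with
    | none => exact Or.inl rfl
    | some txt => exact pvS_ranks _

lemma pvMax?_eq_pvM (l : List Int) : PySem.List.max? l (fun x => x) = pvM l := by
  cases l with
  | nil => rfl
  | cons x t => simpa [pvM] using PySem.List.max?_id_cons (x := x) (t := t)

-- ===== VERDICT (by name: the statement is the Claim_ definition above) =====
theorem infer_current_phase_spec : Claim_equal_infer_current_phase := by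
  intro tl _ hpre
  unfold Spec_infer_current_phase infer_current_phase infer_current_phase_alt
  have hA := pvFoldA tl hpre none (Or.inl rfl)
  simp only [pvToPhase] at hA
  rw [hA, pvFoldl_omax, pvOmax_none_left]
  have hranks : tl.flatMap (fun link =>
      match (PySem.Dict.mk link).get? "text" with
      | none => ([] : List Int)
      | some txt => (PySem.List.enumerate pvPhaseOrder).filterMap (fun ip =>
          if PySem.Str.isIn ip.2 (PySem.Str.lower txt) then some ip.1 else none))
    = tl.flatMap (fun l => match (PySem.Dict.mk l).get? "text" with
      | none => [] | some txt => pvRanksOf (PySem.Str.lower txt)) := by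
    simp only [pvRanksOf]
  rw [hranks, pvMax?_eq_pvM]
  have hS : pvS (pvM (tl.flatMap (fun l => match (PySem.Dict.mk l).get? "text" with
      | none => [] | some txt => pvRanksOf (PySem.Str.lower txt)))) := by
    have := pvS_fold tl none (Or.inl rfl)
    rwa [pvFoldl_omax, pvOmax_none_left] at this
  rcases hS with h|h|h|h|h <;> rw [h] <;> decide
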